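-- pv_equiv track=rewrite | github.com/balwierz/LeetCode | 1402 Reducing Dishes.py | maxSatisfaction2
-- ===== SOURCE A (Python) =====
-- from typing import List
--
-- def maxSatisfaction2(s: List[int]) -> int:
--     s.sort(reverse=True)
--     total = 0
--     cur_sum = 0
--     for val in s:
--         cur_sum += val
--         if (cur_sum < 0):
--             break
--         total += cur_sum
--     return total
-- ===== SOURCE B (Python) =====
-- from typing import List
--
-- def maxSatisfaction2(s: List[int]) -> int:
--     s.sort(reverse=True)
--     # For every candidate count k of kept dishes, compute its satisfaction
--     # directly as a weighted sum: the j-th best dish is cooked at time k-j,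
--     # so value(k) = sum_{j<k} (k-j)*s[j].  Return the best over k = 0..n.
--     best = 0
--     for k in range(1, len(s) + 1):
--         v = 0
--         w = k
--         for x in s[:k]:
--             v += w * x
--             w -= 1
--         best = max(best, v)
--     return best
-- ===== Notes on version B (the rewrite author's own statement) =====
-- stated objective: alternative
-- what changed: Replaces A's single greedy pass over running prefix sums (break on first negative) with an exhaustive evaluation: for each candidate count k of kept dishes it recomputes the satisfaction from scratch as the weighted sum sum_{j<k}(k-j)*s[j] via a nested loop, and returns the maximum over all k including 0; correct because on a descending sort the greedy stop point is the argmax of these values.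
import Mathlib
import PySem

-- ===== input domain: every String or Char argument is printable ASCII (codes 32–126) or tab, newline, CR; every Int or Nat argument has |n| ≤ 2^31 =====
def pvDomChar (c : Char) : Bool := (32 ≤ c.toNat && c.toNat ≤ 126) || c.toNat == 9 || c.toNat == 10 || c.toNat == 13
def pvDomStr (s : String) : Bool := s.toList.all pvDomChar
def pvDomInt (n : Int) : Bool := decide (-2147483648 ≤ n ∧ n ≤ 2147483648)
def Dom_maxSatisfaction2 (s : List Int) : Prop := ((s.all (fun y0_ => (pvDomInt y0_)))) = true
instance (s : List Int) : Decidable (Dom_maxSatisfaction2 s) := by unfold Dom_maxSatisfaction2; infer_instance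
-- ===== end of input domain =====

-- B replaces A's greedy break-on-negative prefix-sum pass by an exhaustive nested
-- evaluation: for each candidate count k it recomputes the weighted sum
-- sum_{j<k}(k-j)*s[j] from scratch and returns the maximum (objective: alternative).
-- Both Pythons sort the argument in place (s.sort(reverse=True)); the equivalence
-- proved here is about the return value.

-- ===== PORT A =====
-- A's for loop with its break: total/cur_sum carried through the recursion
def pvALoop : List Int → Int → Int → Int
  | [], total, _ => total
  | val :: rest, total, cur_sum =>
      let c := cur_sum + val
      if c < 0 then total else pvALoop rest (total + c) c

def maxSatisfaction2 (s : List Int) : Int :=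
  pvALoop (PySem.List.sorted s (fun x => x) true) 0 0

-- ===== PORT B =====
-- B's inner loop: v accumulates w*x with the weight w counting down
def pvInner : List Int → Int → Int → Int
  | [], v, _ => v
  | x :: rest, v, w => pvInner rest (v + w * x) (w - 1)

def maxSatisfaction2_alt (s : List Int) : Int :=
  let t := PySem.List.sorted s (fun x => x) true
  (PySem.List.pyRange 1 ((t.length : Int) + 1) 1).foldl
    (fun best k => max best (pvInner (PySem.List.slice t none (some k)) 0 k)) 0

-- ===== PRECONDITION & SPEC =====
def Spec_maxSatisfaction2 (s : List Int) (out : Int) : Prop := out = maxSatisfaction2_alt s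
instance (s : List Int) (out : Int) : Decidable (Spec_maxSatisfaction2 s out) := by unfold Spec_maxSatisfaction2; infer_instance

-- ===== CLAIM (what is proved, stated in full; the proofs are below) =====
def Claim_equal_maxSatisfaction2 : Prop := ∀ (s : List Int), Dom_maxSatisfaction2 s → Spec_maxSatisfaction2 s (maxSatisfaction2 s)

-- ===== LEMMAS AND PROOFS =====

-- proof-only reference loop: A's loop without the break, tracking the best total seen
def pvBLoop : List Int → Int → Int → Int → Int
  | [], best, _, _ => best
  | v :: rest, best, t, cur =>
      let c := cur + v
      let t' := t + c
      pvBLoop rest (max best t') t' c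

-- SS l = sum over positions j of (l.length - j) * l[j]   (head weighted most)
def pvSS : List Int → Int
  | [] => 0
  | x :: r => ((r.length : Int) + 1) * x + pvSS r

theorem pvInner_eq (l : List Int) : ∀ v w : Int,
    pvInner l v w = v + pvSS l + (w - (l.length : Int)) * l.sum := by
  induction l with
  | nil => intro v w; simp [pvInner, pvSS]
  | cons x r ih =>
      intro v w
      simp only [pvInner, pvSS, ih, List.sum_cons, List.length_cons]
      push_cast
      ring

theorem pvSS_append_singleton (l : List Int) (v : Int) :
    pvSS (l ++ [v]) = pvSS l + l.sum + v := by
  induction l with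
  | nil => simp [pvSS]
  | cons x r ih =>
      simp only [List.cons_append, pvSS, ih, List.sum_cons, List.length_append,
        List.length_cons, List.length_nil]
      push_cast
      ring

-- once the running prefix sum is negative and every remaining dish value is ≤ 0,
-- t only decreases, so the recorded maximum never changes
theorem pvBLoop_stuck (l : List Int) :
    (∀ x ∈ l, x ≤ 0) → ∀ best t cur : Int, cur < 0 → t ≤ best → pvBLoop l best t cur = best := by
  induction l with
  | nil => intro _ best t cur _ _; simp [pvBLoop]
  | cons v rest ih =>
      intro h best t cur hcur ht
      have hv : v ≤ 0 := h v (List.mem_cons_self ..)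
      have hrest : ∀ x ∈ rest, x ≤ 0 := fun x hx => h x (List.mem_cons_of_mem _ hx)
      simp only [pvBLoop]
      have hmax : max best (t + (cur + v)) = best := by omega
      rw [hmax]
      exact ih hrest best (t + (cur + v)) (cur + v) (by omega) (by omega)

-- while the running sum stays nonnegative the two loops move in lockstep
-- (best = t = total); at A's break point the reference loop's maximum freezes at total
theorem pvALoop_eq_pvBLoop (l : List Int) :
    l.Pairwise (fun a b => b ≤ a) →
    ∀ total cur : Int, 0 ≤ cur → pvALoop l total cur = pvBLoop l total total cur := by
  induction l with
  | nil => intro _ total cur _; simp [pvALoop, pvBLoop]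
  | cons v rest ih =>
      intro hp total cur hcur
      have hhead : ∀ x ∈ rest, x ≤ v := (List.pairwise_cons.mp hp).1
      have hrest := (List.pairwise_cons.mp hp).2
      by_cases hneg : cur + v < 0
      · have hv : v < 0 := by omega
        have hle : ∀ x ∈ rest, x ≤ 0 := fun x hx => le_trans (hhead x hx) (le_of_lt hv)
        simp only [pvALoop, pvBLoop, if_pos hneg]
        have hmax : max total (total + (cur + v)) = total := by omega
        rw [hmax]
        exact (pvBLoop_stuck rest hle total (total + (cur + v)) (cur + v) hneg (by omega)).symm
      · have hnn : 0 ≤ cur + v := by omega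
        simp only [pvALoop, pvBLoop, if_neg hneg]
        have hmax : max total (total + (cur + v)) = total + (cur + v) := by omega
        rw [hmax]
        exact ih hrest (total + (cur + v)) (cur + v) hnn

-- B's outer fold over k = done.length+1 .. n, on the full list done ++ rest,
-- equals the reference loop continued from the processed prefix `done`
theorem pvFold_eq_pvBLoop (rest : List Int) : ∀ (done : List Int) (best : Int),
    (PySem.List.pyRange ((done.length : Int) + 1)
        (((done ++ rest).length : Int) + 1) 1).foldl
      (fun b k => max b (pvInner (PySem.List.slice (done ++ rest) none (some k)) 0 k)) best
    = pvBLoop rest best (pvSS done) done.sum := by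
  induction rest with
  | nil =>
      intro done best
      rw [PySem.List.pyRange_one_eq_nil (by simp)]
      simp [pvBLoop]
  | cons v r ih =>
      intro done best
      have hlt : ((done.length : Int) + 1) < ((done ++ (v :: r)).length : Int) + 1 := by
        simp
      rw [PySem.List.pyRange_one_cons hlt]
      simp only [List.foldl_cons]
      have hslice : PySem.List.slice (done ++ (v :: r)) none (some ((done.length : Int) + 1))
          = done ++ [v] := by
        have : ((done.length : Int) + 1) = ((done.length + 1 : Nat) : Int) := by push_cast; ring
        rw [this, PySem.List.slice_to_natCast]
        rw [List.take_append]
        simp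
      rw [hslice]
      have hinner : pvInner (done ++ [v]) 0 ((done.length : Int) + 1)
          = pvSS done + done.sum + v := by
        rw [pvInner_eq, pvSS_append_singleton]
        simp
      rw [hinner]
      have hre : done ++ (v :: r) = (done ++ [v]) ++ r := by simp
      have harith : ((done.length : Int) + 1) + 1 = (((done ++ [v]).length : Int) + 1) := by
        simp
      rw [hre, harith, ih (done ++ [v]) (max best (pvSS done + done.sum + v))]
      simp only [pvBLoop, pvSS_append_singleton, List.sum_append, List.sum_cons,
        List.sum_nil]
      ring_nf

-- ===== VERDICT (by name: the statement is the Claim_ definition above) =====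
theorem maxSatisfaction2_spec : Claim_equal_maxSatisfaction2 := by
  intro s _
  unfold Spec_maxSatisfaction2 maxSatisfaction2 maxSatisfaction2_alt
  have hp := PySem.List.sorted_pairwise_rev (xs := s) (key := fun x => x)
  set t := PySem.List.sorted s (fun x => x) true with ht
  have hfold := pvFold_eq_pvBLoop t [] 0
  simp only [List.nil_append, List.length_nil, Nat.cast_zero, zero_add, pvSS,
    List.sum_nil] at hfold
  rw [hfold]
  exact pvALoop_eq_pvBLoop t hp 0 0 le_rfl
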